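-- pv_equiv track=rewrite | github.com/deyvitt/babybionn-vbc-developer | neuron/baseVNI_demo.py | classify_scene
-- ===== SOURCE A (Python) =====
-- from typing import Dict, List, Optional, Any, Tuple
--
-- def classify_scene(objects: List[Dict]) -> str:
--     """Classify scene based on detected objects"""
--     object_names = [obj['name'] for obj in objects]
--
--     # Scene classification logic
--     medical_objects = ['person', 'bed', 'chair', 'book', 'cell phone']
--     outdoor_objects = ['car', 'tree', 'person', 'sky', 'building']
--     indoor_objects = ['chair', 'table', 'tv', 'laptop', 'cup']
--
--     medical_score = sum(1 for obj in object_names if obj in medical_objects)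
--     outdoor_score = sum(1 for obj in object_names if obj in outdoor_objects)
--     indoor_score = sum(1 for obj in object_names if obj in indoor_objects)
--
--     scores = {
--         'medical': medical_score,
--         'outdoor': outdoor_score,
--         'indoor': indoor_score
--     }
--
--     if not any(scores.values()):
--         return 'general'
--
--     return max(scores.items(), key=lambda x: x[1])[0]
-- ===== SOURCE B (Python) =====
-- _INDEX = {
--     'person': ('medical', 'outdoor'),
--     'bed': ('medical',),
--     'chair': ('medical', 'indoor'),
--     'book': ('medical',),
--     'cell phone': ('medical',),
--     'car': ('outdoor',),
--     'tree': ('outdoor',),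
--     'sky': ('outdoor',),
--     'building': ('outdoor',),
--     'table': ('indoor',),
--     'tv': ('indoor',),
--     'laptop': ('indoor',),
--     'cup': ('indoor',),
-- }
--
--
-- def classify_scene(objects):
--     """Classify scene based on detected objects (inverted-index single pass)."""
--     scores = {'medical': 0, 'outdoor': 0, 'indoor': 0}
--     for obj in objects:
--         for cat in _INDEX.get(obj['name'], ()):
--             scores[cat] += 1
--     if any(scores.values()):
--         return max(scores, key=scores.get)
--     return 'general'
-- ===== Notes on version B (the rewrite author's own statement) =====
-- stated objective: alternative
-- what changed: Replaces A's three separate membership scans over the name list (each name tested against three 5-element lists) with a precomputed inverted index mapping each object name to its category labels, updating a single scores dict in one pass over the objects.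
import Mathlib
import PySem

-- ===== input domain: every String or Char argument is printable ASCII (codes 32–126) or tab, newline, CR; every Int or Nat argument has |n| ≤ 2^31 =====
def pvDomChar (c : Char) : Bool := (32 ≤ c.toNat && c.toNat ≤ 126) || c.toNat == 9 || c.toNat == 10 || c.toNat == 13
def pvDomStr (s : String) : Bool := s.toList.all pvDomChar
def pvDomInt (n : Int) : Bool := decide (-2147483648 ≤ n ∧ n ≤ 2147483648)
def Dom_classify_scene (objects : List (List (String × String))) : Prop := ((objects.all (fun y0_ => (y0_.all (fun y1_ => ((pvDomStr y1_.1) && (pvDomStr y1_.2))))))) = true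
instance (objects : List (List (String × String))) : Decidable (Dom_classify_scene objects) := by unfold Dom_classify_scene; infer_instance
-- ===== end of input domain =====

-- B replaces A's three membership scans over the object names with a single pass
-- through an inverted index (object name -> its category labels); same result.

-- ===== PORT A =====
def classify_scene (objects : List (List (String × String))) : String :=
  let object_names := objects.map (fun obj => ((PySem.Dict.mk obj).get? "name").getD "")
  let medical_objects := ["person", "bed", "chair", "book", "cell phone"]
  let outdoor_objects := ["car", "tree", "person", "sky", "building"]
  let indoor_objects := ["chair", "table", "tv", "laptop", "cup"]
  let medical_score : Int := (object_names.map (fun obj => if medical_objects.contains obj then (1 : Int) else 0)).sum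
  let outdoor_score : Int := (object_names.map (fun obj => if outdoor_objects.contains obj then (1 : Int) else 0)).sum
  let indoor_score : Int := (object_names.map (fun obj => if indoor_objects.contains obj then (1 : Int) else 0)).sum
  let scores : PySem.Dict String Int :=
    PySem.Dict.ofList [("medical", medical_score), ("outdoor", outdoor_score), ("indoor", indoor_score)]
  if !(scores.values.any (fun v => v != 0)) then "general"
  else ((PySem.List.max? scores.items (fun x => x.2)).getD ("", 0)).1

-- ===== PORT B =====
-- the module-level inverted index _INDEX of Source B (a dict literal)
def pvIndex : PySem.Dict String (List String) :=
  PySem.Dict.mk [("person", ["medical", "outdoor"]), ("bed", ["medical"]),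
    ("chair", ["medical", "indoor"]), ("book", ["medical"]), ("cell phone", ["medical"]),
    ("car", ["outdoor"]), ("tree", ["outdoor"]), ("sky", ["outdoor"]), ("building", ["outdoor"]),
    ("table", ["indoor"]), ("tv", ["indoor"]), ("laptop", ["indoor"]), ("cup", ["indoor"])]

def classify_scene_alt (objects : List (List (String × String))) : String :=
  let scores : PySem.Dict String Int := objects.foldl
    (fun sc obj =>
      (pvIndex.getD (((PySem.Dict.mk obj).get? "name").getD "") []).foldl
        (fun sc cat => sc.modify cat 0 (· + 1)) sc)
    (PySem.Dict.ofList [("medical", 0), ("outdoor", 0), ("indoor", 0)])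
  if scores.values.any (fun v => v != 0) then
    (PySem.List.max? scores.keys (fun k => scores.getD k 0)).getD ""
  else "general"

-- ===== PRECONDITION & SPEC =====
-- Pre_ excludes exactly the inputs on which some object dict lacks the key "name":
-- there the Python A (and B alike) raises KeyError at obj['name'].
def Pre_classify_scene (objects : List (List (String × String))) : Prop :=
  ∀ obj ∈ objects, (PySem.Dict.mk obj).contains "name" = true
instance (objects : List (List (String × String))) : Decidable (Pre_classify_scene objects) := by unfold Pre_classify_scene; infer_instance
def pvWitness_classify_scene : (List (List (String × String))) := [[("name", "car")], [("name", "dog")]]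

def Spec_classify_scene (objects : List (List (String × String))) (out : String) : Prop := out = classify_scene_alt objects
instance (objects : List (List (String × String))) (out : String) : Decidable (Spec_classify_scene objects out) := by unfold Spec_classify_scene; infer_instance

-- ===== CLAIM (what is proved, stated in full; the proofs are below) =====
def Claim_equal_classify_scene : Prop := ∀ (objects : List (List (String × String))), Dom_classify_scene objects → Pre_classify_scene objects → Spec_classify_scene objects (classify_scene objects)

-- ===== LEMMAS AND PROOFS =====

-- 0/1 indicator of membership in each of A's three category lists
def pvMI (name : String) : Int := if ["person", "bed", "chair", "book", "cell phone"].contains name then 1 else 0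
def pvOI (name : String) : Int := if ["car", "tree", "person", "sky", "building"].contains name then 1 else 0
def pvII (name : String) : Int := if ["chair", "table", "tv", "laptop", "cup"].contains name then 1 else 0

-- one object's inner loop in B bumps each of the three slots by its indicator
set_option maxHeartbeats 1000000 in
lemma pv_step (name : String) (a b c : Int) :
    (pvIndex.getD name []).foldl (fun sc cat => sc.modify cat 0 (· + 1))
      (PySem.Dict.mk [("medical", a), ("outdoor", b), ("indoor", c)])
    = PySem.Dict.mk [("medical", a + pvMI name), ("outdoor", b + pvOI name), ("indoor", c + pvII name)] := by
  simp only [pvIndex, PySem.Dict.getD, PySem.Dict.get?_mk_cons, beq_iff_eq]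
  rcases eq_or_ne "person" name with h1 | h1; · subst h1; simp [PySem.Dict.modify, PySem.Dict.insert, PySem.Dict.getD, PySem.Dict.get?_mk_cons, pvMI, pvOI, pvII]
  rw [if_neg h1]
  rcases eq_or_ne "bed" name with h2 | h2; · subst h2; simp [PySem.Dict.modify, PySem.Dict.insert, PySem.Dict.getD, PySem.Dict.get?_mk_cons, pvMI, pvOI, pvII]
  rw [if_neg h2]
  rcases eq_or_ne "chair" name with h3 | h3; · subst h3; simp [PySem.Dict.modify, PySem.Dict.insert, PySem.Dict.getD, PySem.Dict.get?_mk_cons, pvMI, pvOI, pvII]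
  rw [if_neg h3]
  rcases eq_or_ne "book" name with h4 | h4; · subst h4; simp [PySem.Dict.modify, PySem.Dict.insert, PySem.Dict.getD, PySem.Dict.get?_mk_cons, pvMI, pvOI, pvII]
  rw [if_neg h4]
  rcases eq_or_ne "cell phone" name with h5 | h5; · subst h5; simp [PySem.Dict.modify, PySem.Dict.insert, PySem.Dict.getD, PySem.Dict.get?_mk_cons, pvMI, pvOI, pvII]
  rw [if_neg h5]
  rcases eq_or_ne "car" name with h6 | h6; · subst h6; simp [PySem.Dict.modify, PySem.Dict.insert, PySem.Dict.getD, PySem.Dict.get?_mk_cons, pvMI, pvOI, pvII]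
  rw [if_neg h6]
  rcases eq_or_ne "tree" name with h7 | h7; · subst h7; simp [PySem.Dict.modify, PySem.Dict.insert, PySem.Dict.getD, PySem.Dict.get?_mk_cons, pvMI, pvOI, pvII]
  rw [if_neg h7]
  rcases eq_or_ne "sky" name with h8 | h8; · subst h8; simp [PySem.Dict.modify, PySem.Dict.insert, PySem.Dict.getD, PySem.Dict.get?_mk_cons, pvMI, pvOI, pvII]
  rw [if_neg h8]
  rcases eq_or_ne "building" name with h9 | h9; · subst h9; simp [PySem.Dict.modify, PySem.Dict.insert, PySem.Dict.getD, PySem.Dict.get?_mk_cons, pvMI, pvOI, pvII]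
  rw [if_neg h9]
  rcases eq_or_ne "table" name with h10 | h10; · subst h10; simp [PySem.Dict.modify, PySem.Dict.insert, PySem.Dict.getD, PySem.Dict.get?_mk_cons, pvMI, pvOI, pvII]
  rw [if_neg h10]
  rcases eq_or_ne "tv" name with h11 | h11; · subst h11; simp [PySem.Dict.modify, PySem.Dict.insert, PySem.Dict.getD, PySem.Dict.get?_mk_cons, pvMI, pvOI, pvII]
  rw [if_neg h11]
  rcases eq_or_ne "laptop" name with h12 | h12; · subst h12; simp [PySem.Dict.modify, PySem.Dict.insert, PySem.Dict.getD, PySem.Dict.get?_mk_cons, pvMI, pvOI, pvII]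
  rw [if_neg h12]
  rcases eq_or_ne "cup" name with h13 | h13; · subst h13; simp [PySem.Dict.modify, PySem.Dict.insert, PySem.Dict.getD, PySem.Dict.get?_mk_cons, pvMI, pvOI, pvII]
  rw [if_neg h13]
  rw [pvMI, pvOI, pvII]
  rw [if_neg, if_neg, if_neg]
  · simp [PySem.Dict.get?]
  all_goals (intro hc; simp only [List.contains_eq_mem, List.mem_cons, List.not_mem_nil, or_false,
    decide_eq_true_eq] at hc; rcases hc with h | h | h | h | h <;> simp_all)

-- B's whole fold produces, in one literal dict, the three counts A computes
lemma pv_fold (names : List String) (a b c : Int) :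
    names.foldl (fun sc name =>
        (pvIndex.getD name []).foldl (fun sc cat => sc.modify cat 0 (· + 1)) sc)
      (PySem.Dict.mk [("medical", a), ("outdoor", b), ("indoor", c)])
    = PySem.Dict.mk [("medical", a + (names.map pvMI).sum),
                     ("outdoor", b + (names.map pvOI).sum),
                     ("indoor", c + (names.map pvII).sum)] := by
  induction names generalizing a b c with
  | nil => simp
  | cons h t ih => simp [pv_step, ih, add_assoc]

-- the tails of both ports agree on any 3-entry score dict
lemma pv_tail (m o i : Int) :
    (if !((PySem.Dict.mk [("medical", m), ("outdoor", o), ("indoor", i)]).values.any (fun v => v != 0)) then "general"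
     else ((PySem.List.max? (PySem.Dict.mk [("medical", m), ("outdoor", o), ("indoor", i)]).items (fun x => x.2)).getD ("", 0)).1)
    = (if (PySem.Dict.mk [("medical", m), ("outdoor", o), ("indoor", i)]).values.any (fun v => v != 0) then
        (PySem.List.max? (PySem.Dict.mk [("medical", m), ("outdoor", o), ("indoor", i)]).keys
          (fun k => (PySem.Dict.mk [("medical", m), ("outdoor", o), ("indoor", i)]).getD k 0)).getD ""
      else "general") := by
  simp only [PySem.Dict.values, PySem.Dict.keys, PySem.List.max?,
    PySem.Dict.getD, PySem.Dict.get?_mk_cons, beq_iff_eq]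
  simp only [List.map_cons, List.map_nil]
  norm_num
  split_ifs <;> try simp_all
  all_goals split_ifs <;> simp_all <;> omega

-- A's three-key dict literal built by ofList is the plain association list
lemma pv_ofList (m o i : Int) :
    PySem.Dict.ofList [("medical", m), ("outdoor", o), ("indoor", i)]
      = PySem.Dict.mk [("medical", m), ("outdoor", o), ("indoor", i)] := by
  simp [PySem.Dict.ofList, PySem.Dict.update, PySem.Dict.insert, PySem.Dict.empty,
    PySem.Dict.contains]

-- ===== VERDICT (by name: the statement is the Claim_ definition above) =====
theorem classify_scene_spec : Claim_equal_classify_scene := by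
  intro objects _ _
  unfold Spec_classify_scene classify_scene classify_scene_alt
  simp only [pv_ofList]
  have hf := pv_fold (objects.map (fun obj => ((PySem.Dict.mk obj).get? "name").getD "")) 0 0 0
  rw [List.foldl_map] at hf
  rw [hf]
  simp only [zero_add, List.map_map]
  exact pv_tail _ _ _
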